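-- pv_equiv track=rewrite | github.com/thanedouglass/CS100-GIR | Labs & Exercises/red stripe image filter.py | red_stripe
-- ===== SOURCE A (Python) =====
-- def red_stripe(image_matrix, stripe_height=50, gap_height=50):
--     image_height = len(image_matrix)
--     image_width = len(image_matrix[0])
--     current_stripe = 0
--
--     for row in range(image_height):
--         # Check if we are in a stripe
--         if current_stripe < stripe_height:
--             # for each row, go through each column
--             for col in range(image_width):
--                 image_matrix[row][col][0] = 255  # Set red component to 255
--         current_stripe = (current_stripe + 1) % (stripe_height + gap_height)
--
--     return image_matrix
-- ===== SOURCE B (Python) =====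
-- def red_stripe(image_matrix, stripe_height=50, gap_height=50):
--     # Block traversal: jump directly from one stripe start to the next
--     # (start += period) and paint each whole stripe block; no per-row test,
--     # no running counter.  Mutates image_matrix in place like the original.
--     image_width = len(image_matrix[0])
--     n = len(image_matrix)
--     period = stripe_height + gap_height
--     start = 0
--     while start < n:
--         for row in range(start, min(start + stripe_height, n)):
--             for col in range(image_width):
--                 image_matrix[row][col][0] = 255
--         start += period
--     return image_matrix
-- ===== Notes on version B (the rewrite author's own statement) =====
-- stated objective: alternative
-- what changed: Replaced A's row-by-row loop with a threaded wrapping stripe counter by a block traversal: an outer loop that jumps directly from one stripe start to the next (start += stripe_height + gap_height) and paints each whole stripe block of rows, so gap rows are never visited and no per-row stripe test or counter exists.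
-- outside the precondition, e.g. on red_stripe([[[0]]], 1, -3): A returns [[[255]]], B raises IndexError; on red_stripe([[[0]]], -1, 0): A returns [[[0]]], B does not finish within the time limit
import Mathlib
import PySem

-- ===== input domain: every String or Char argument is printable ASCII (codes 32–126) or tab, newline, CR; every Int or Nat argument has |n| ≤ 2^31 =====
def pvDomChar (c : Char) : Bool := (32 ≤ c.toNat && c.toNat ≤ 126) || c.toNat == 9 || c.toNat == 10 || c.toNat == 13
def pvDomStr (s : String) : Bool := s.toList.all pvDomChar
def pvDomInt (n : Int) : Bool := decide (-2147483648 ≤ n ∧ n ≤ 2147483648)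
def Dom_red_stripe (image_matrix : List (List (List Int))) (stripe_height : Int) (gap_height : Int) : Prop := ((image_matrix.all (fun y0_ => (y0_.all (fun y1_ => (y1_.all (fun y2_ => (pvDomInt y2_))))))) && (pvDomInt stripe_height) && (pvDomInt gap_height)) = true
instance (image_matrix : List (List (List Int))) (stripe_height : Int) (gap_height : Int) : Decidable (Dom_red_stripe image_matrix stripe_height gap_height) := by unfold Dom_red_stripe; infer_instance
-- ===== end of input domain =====

-- B replaces A's row-by-row loop with a threaded stripe counter by a block traversal that
-- jumps from stripe start to stripe start (start += period) and paints whole blocks;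
-- equivalence is about the return value (both Pythons mutate image_matrix in place identically).


-- ===== PORT A =====
-- inner column loop, shared verbatim by both Pythons: `for col in range(image_width): image_matrix[row][col][0] = 255`
def paintRow (w : Nat) (row : List (List Int)) : List (List Int) :=
  (List.range w).foldl (fun r c => r.modify c (fun px => px.set 0 255)) row

-- A's row loop: the running counter `current_stripe` is threaded through the recursion
def red_stripe_goA (stripe_height p : Int) (w : Nat) :
    List (List (List Int)) → Int → List (List (List Int))
  | [], _ => []
  | row :: rest, cur =>
      (if cur < stripe_height then paintRow w row else row) ::
        red_stripe_goA stripe_height p w rest (PySem.Int.mod (cur + 1) p)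

def red_stripe (image_matrix : List (List (List Int))) (stripe_height : Int) (gap_height : Int) : List (List (List Int)) :=
  let w := ((PySem.List.pyGet? image_matrix 0).getD []).length
  red_stripe_goA stripe_height (stripe_height + gap_height) w image_matrix 0

-- ===== PORT B =====
-- `for row in range(start, min(start + stripe_height, n)): <inner column loop>`
def paintBlock (w : Nat) (a b : Int) (m : List (List (List Int))) : List (List (List Int)) :=
  (PySem.List.pyRange a b 1).foldl (fun acc r => acc.modify r.toNat (paintRow w)) m

-- B's while loop `while start < n: paint block; start += period`; fuel = n + 1 makes it
-- structural (inside Pre_ the period is ≥ 1, so the loop exits within n + 1 iterations)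
def red_stripe_goB (stripe_height p : Int) (w : Nat) (n : Int) :
    Nat → Int → List (List (List Int)) → List (List (List Int))
  | 0, _, m => m
  | fuel + 1, start, m =>
      if start < n then
        red_stripe_goB stripe_height p w n fuel (start + p)
          (paintBlock w start (min (start + stripe_height) n) m)
      else m

def red_stripe_alt (image_matrix : List (List (List Int))) (stripe_height : Int) (gap_height : Int) : List (List (List Int)) :=
  let w := ((PySem.List.pyGet? image_matrix 0).getD []).length
  let n : Int := image_matrix.length
  red_stripe_goB stripe_height (stripe_height + gap_height) w n (image_matrix.length + 1) 0 image_matrix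

-- ===== PRECONDITION & SPEC =====
-- Pre_ excludes exactly: the empty matrix (A raises IndexError on image_matrix[0]); a
-- non-positive period stripe_height + gap_height (zero: A raises ZeroDivisionError;
-- negative: B's backward-drifting block start runs off the list (IndexError) or loops
-- forever while A happens to return — negative heights are outside the natural domain of
-- the task); and painted rows shorter than row 0
-- or containing an empty pixel among their first image_width entries (A raises IndexError).
def Pre_red_stripe (image_matrix : List (List (List Int))) (stripe_height : Int) (gap_height : Int) : Prop :=
  image_matrix ≠ [] ∧ 1 ≤ stripe_height + gap_height ∧
  ∀ r ∈ List.range image_matrix.length,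
    PySem.Int.mod (r : Int) (stripe_height + gap_height) < stripe_height →
    ((PySem.List.pyGet? image_matrix 0).getD []).length ≤ ((PySem.List.pyGet? image_matrix (r : Int)).getD []).length ∧
    ∀ px ∈ ((PySem.List.pyGet? image_matrix (r : Int)).getD []).take ((PySem.List.pyGet? image_matrix 0).getD []).length, px ≠ []
instance (image_matrix : List (List (List Int))) (stripe_height : Int) (gap_height : Int) : Decidable (Pre_red_stripe image_matrix stripe_height gap_height) := by unfold Pre_red_stripe; infer_instance

def pvWitness_red_stripe : List (List (List Int)) × Int × Int := ([[[0, 0, 0], [1, 1, 1]], [[2, 2, 2]]], 1, 1)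

def Spec_red_stripe (image_matrix : List (List (List Int))) (stripe_height : Int) (gap_height : Int) (out : List (List (List Int))) : Prop := out = red_stripe_alt image_matrix stripe_height gap_height
instance (image_matrix : List (List (List Int))) (stripe_height : Int) (gap_height : Int) (out : List (List (List Int))) : Decidable (Spec_red_stripe image_matrix stripe_height gap_height out) := by unfold Spec_red_stripe; infer_instance

-- ===== CLAIM (what is proved, stated in full; the proofs are below) =====
def Claim_equal_red_stripe : Prop := ∀ (image_matrix : List (List (List Int))) (stripe_height : Int) (gap_height : Int), Dom_red_stripe image_matrix stripe_height gap_height → Pre_red_stripe image_matrix stripe_height gap_height → Spec_red_stripe image_matrix stripe_height gap_height (red_stripe image_matrix stripe_height gap_height)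

-- ===== LEMMAS AND PROOFS =====

theorem pymod_congr (p a b : Int) (hp : p ≠ 0) (h : p ∣ a - b) :
    PySem.Int.mod a p = PySem.Int.mod b p := by
  have da : p ∣ a - PySem.Int.mod a p := by
    refine ⟨PySem.Int.floordiv a p, ?_⟩
    have := PySem.Int.floordiv_mul_add_mod a p
    linarith [this]
  have db : p ∣ b - PySem.Int.mod b p := by
    refine ⟨PySem.Int.floordiv b p, ?_⟩
    have := PySem.Int.floordiv_mul_add_mod b p
    linarith [this]
  have hd : p ∣ PySem.Int.mod a p - PySem.Int.mod b p := by
    have h2 := (h.sub da).add db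
    have h3 : a - b - (a - PySem.Int.mod a p) + (b - PySem.Int.mod b p)
        = PySem.Int.mod a p - PySem.Int.mod b p := by ring
    rwa [h3] at h2
  have habs : |p| ∣ PySem.Int.mod a p - PySem.Int.mod b p := (abs_dvd _ _).mpr hd
  have hlt : |PySem.Int.mod a p - PySem.Int.mod b p| < |p| := by
    rcases lt_or_gt_of_ne hp with hneg | hpos
    · have b1 := PySem.Int.mod_neg_bounds a hneg
      have b2 := PySem.Int.mod_neg_bounds b hneg
      rw [abs_of_neg hneg]
      rcases abs_cases (PySem.Int.mod a p - PySem.Int.mod b p) with ⟨he, _⟩ | ⟨he, _⟩ <;> omega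
    · have b1l := PySem.Int.mod_nonneg a hpos
      have b1u := PySem.Int.mod_lt a hpos
      have b2l := PySem.Int.mod_nonneg b hpos
      have b2u := PySem.Int.mod_lt b hpos
      rw [abs_of_pos hpos]
      rcases abs_cases (PySem.Int.mod a p - PySem.Int.mod b p) with ⟨he, _⟩ | ⟨he, _⟩ <;> omega
  have := Int.eq_zero_of_abs_lt_dvd habs hlt
  omega

-- a % p = a for 0 ≤ a < p (Python mod, positive divisor)
theorem pymod_of_lt (p a : Int) (h0 : 0 ≤ a) (h1 : a < p) : PySem.Int.mod a p = a := by
  have hp : (0:Int) < p := by omega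
  have d : p ∣ a - PySem.Int.mod a p := by
    refine ⟨PySem.Int.floordiv a p, ?_⟩
    have := PySem.Int.floordiv_mul_add_mod a p
    linarith [this]
  have l := PySem.Int.mod_nonneg a hp
  have u := PySem.Int.mod_lt a hp
  have habs : |p| ∣ a - PySem.Int.mod a p := (abs_dvd _ _).mpr d
  have hlt : |a - PySem.Int.mod a p| < |p| := by
    rw [abs_of_pos hp]
    rcases abs_cases (a - PySem.Int.mod a p) with ⟨he, _⟩ | ⟨he, _⟩ <;> omega
  have := Int.eq_zero_of_abs_lt_dvd habs hlt
  omega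

theorem pymod_step (p a : Int) (hp : p ≠ 0) :
    PySem.Int.mod (PySem.Int.mod a p + 1) p = PySem.Int.mod (a + 1) p := by
  apply pymod_congr p _ _ hp
  have d : p ∣ a - PySem.Int.mod a p := by
    refine ⟨PySem.Int.floordiv a p, ?_⟩
    have := PySem.Int.floordiv_mul_add_mod a p
    linarith [this]
  have h1 : PySem.Int.mod a p + 1 - (a + 1) = -(a - PySem.Int.mod a p) := by ring
  rw [h1]
  exact d.neg_right

-- A's loop as an indexed map
theorem goA_eq_mapIdx (sh p : Int) (w : Nat) (hp : p ≠ 0) :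
    ∀ (rows : List (List (List Int))) (k : Nat),
      red_stripe_goA sh p w rows (PySem.Int.mod (k : Int) p) =
      rows.mapIdx (fun i row => if PySem.Int.mod ((k : Int) + (i : Int)) p < sh then paintRow w row else row) := by
  intro rows
  induction rows with
  | nil => intro k; simp [red_stripe_goA]
  | cons row rest ih =>
    intro k
    rw [List.mapIdx_cons]
    simp only [red_stripe_goA, Nat.cast_zero, add_zero]
    rw [pymod_step p (k : Int) hp]
    have hk : ((k : Int) + 1) = ((k + 1 : Nat) : Int) := by push_cast; omega
    rw [hk, ih (k + 1)]
    have hfun : (fun (i : Nat) (row : List (List Int)) =>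
          if PySem.Int.mod (((k + 1 : Nat) : Int) + (i : Int)) p < sh then paintRow w row else row)
        = (fun (i : Nat) (row : List (List Int)) =>
          if PySem.Int.mod ((k : Int) + ((i + 1 : Nat) : Int)) p < sh then paintRow w row else row) := by
      funext i row
      congr 3
      push_cast
      omega
    rw [hfun]

theorem paintRow_getElem? (w : Nat) (row : List (List Int)) (c : Nat) :
    (paintRow w row)[c]? = if c < w then (row[c]?).map (fun px => px.set 0 255) else row[c]? := by
  induction w with
  | zero => simp [paintRow]
  | succ k ih =>
    unfold paintRow
    rw [List.range_succ, List.foldl_append]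
    show ((paintRow k row).modify k (fun px => px.set 0 255))[c]? = _
    rw [List.getElem?_modify, ih]
    rcases hr : row[c]? with _ | px <;> by_cases h1 : c < k <;> by_cases h2 : c = k
    all_goals try simp_all
    all_goals try (intro h; omega)
    rw [if_neg (by omega), if_neg (by omega)]
    simp [show k ≠ c from fun h => h2 h.symm]

theorem paintRow_idem (w : Nat) (row : List (List Int)) :
    paintRow w (paintRow w row) = paintRow w row := by
  apply List.ext_getElem?
  intro c
  simp only [paintRow_getElem?]
  split_ifs with h
  · rcases row[c]? with _ | px <;> simp [List.set_set]
  · rfl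

theorem paintBlock_getElem? (w : Nat) (b : Int) :
    ∀ (a : Int) (m : List (List (List Int))) (j : Nat), 0 ≤ a →
    (paintBlock w a b m)[j]? =
      if a ≤ (j : Int) ∧ (j : Int) < b then (m[j]?).map (paintRow w) else m[j]? := by
  have key : ∀ (fuel : Nat) (a : Int), (b - a).toNat ≤ fuel → ∀ (m : List (List (List Int))) (j : Nat), 0 ≤ a →
      (paintBlock w a b m)[j]? =
        if a ≤ (j : Int) ∧ (j : Int) < b then (m[j]?).map (paintRow w) else m[j]? := by
    intro fuel
    induction fuel with
    | zero =>
      intro a hfa m j ha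
      have hb : b ≤ a := by omega
      unfold paintBlock
      rw [PySem.List.pyRange_one_eq_nil hb]
      simp only [List.foldl_nil]
      rw [if_neg (by omega)]
    | succ k ih =>
      intro a hfa m j ha
      by_cases hab : a < b
      · unfold paintBlock
        rw [PySem.List.pyRange_one_cons hab]
        simp only [List.foldl_cons]
        have : ((PySem.List.pyRange (a+1) b 1).foldl (fun acc r => acc.modify r.toNat (paintRow w)) (m.modify a.toNat (paintRow w)))
            = paintBlock w (a+1) b (m.modify a.toNat (paintRow w)) := rfl
        rw [this, ih (a+1) (by omega) _ j (by omega)]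
        rw [List.getElem?_modify]
        by_cases hj : a ≤ (j : Int) ∧ (j : Int) < b
        · rw [if_pos hj]
          by_cases hj1 : a + 1 ≤ (j : Int)
          · rw [if_pos ⟨hj1, hj.2⟩]
            have hne : a.toNat ≠ j := by omega
            cases m[j]? <;> simp [hne]
          · rw [if_neg (by omega)]
            have heq : a.toNat = j := by omega
            cases m[j]? <;> simp [heq]
        · rw [if_neg hj, if_neg (by omega)]
          have hne : ¬ (a.toNat = j) := by omega
          cases m[j]? <;> simp [hne]
      · unfold paintBlock
        rw [PySem.List.pyRange_one_eq_nil (by omega)]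
        simp only [List.foldl_nil]
        rw [if_neg (by omega)]
  intro a m j ha
  exact key (b - a).toNat a le_rfl m j ha

theorem paintBlock_length (w : Nat) (a b : Int) (m : List (List (List Int))) :
    (paintBlock w a b m).length = m.length := by
  unfold paintBlock
  induction PySem.List.pyRange a b 1 generalizing m with
  | nil => rfl
  | cons r rs ih => simp only [List.foldl_cons]; rw [ih]; exact List.length_modify ..

theorem goB_getElem? (sh p : Int) (w : Nat) (n : Int) (hp : 1 ≤ p) :
    ∀ (fuel : Nat) (start : Int) (m : List (List (List Int))) (j : Nat),
      0 ≤ start → (m.length : Int) = n → n ≤ start + fuel * p →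
      (red_stripe_goB sh p w n fuel start m)[j]? =
        if start ≤ (j : Int) ∧ PySem.Int.mod ((j : Int) - start) p < sh
        then (m[j]?).map (paintRow w) else m[j]? := by
  intro fuel
  induction fuel with
  | zero =>
    intro start m j hs hn hf
    simp only [red_stripe_goB]
    by_cases hj : j < m.length
    · rw [if_neg (by omega)]
    · rw [List.getElem?_eq_none (by omega)]
      split <;> simp
  | succ k ih =>
    intro start m j hs hn hf
    simp only [red_stripe_goB]
    by_cases hlt : start < n
    · rw [if_pos hlt]
      have hlen : ((paintBlock w start (min (start + sh) n) m).length : Int) = n := by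
        rw [paintBlock_length]; exact hn
      rw [ih (start + p) _ j (by omega) hlen (by push_cast at hf ⊢; linarith)]
      rw [paintBlock_getElem? w _ start m j hs]
      by_cases hjlen : j < m.length
      · have hjn : (j : Int) < n := by omega
        -- shift the modulus argument by p
        have hmodshift : PySem.Int.mod ((j : Int) - (start + p)) p = PySem.Int.mod ((j : Int) - start) p := by
          apply pymod_congr p _ _ (by omega)
          exact ⟨-1, by ring⟩
        rw [hmodshift]
        have hml := PySem.Int.mod_nonneg ((j : Int) - start) (show (0:Int) < p by omega)
        have hmu := PySem.Int.mod_lt ((j : Int) - start) (show (0:Int) < p by omega)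
        by_cases hjs : (j : Int) < start
        · -- before the current block: nothing painted on either side
          rw [if_neg (show ¬(start + p ≤ (j:Int) ∧ PySem.Int.mod ((j:Int) - start) p < sh) from by rintro ⟨h, -⟩; omega),
              if_neg (show ¬(start ≤ (j:Int) ∧ (j:Int) < min (start + sh) n) from by rintro ⟨h, -⟩; omega),
              if_neg (show ¬(start ≤ (j:Int) ∧ PySem.Int.mod ((j:Int) - start) p < sh) from by rintro ⟨h, -⟩; omega)]
        · by_cases hjp : (j : Int) < start + p
          · -- inside the current period: mod (j - start) p = j - start
            have hm : PySem.Int.mod ((j : Int) - start) p = (j : Int) - start :=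
              pymod_of_lt p _ (by omega) (by omega)
            by_cases hsh : (j : Int) - start < sh
            · rw [if_neg (show ¬(start + p ≤ (j:Int) ∧ PySem.Int.mod ((j:Int) - start) p < sh) from by rintro ⟨h, -⟩; omega),
                  if_pos (show start ≤ (j:Int) ∧ (j:Int) < min (start + sh) n from ⟨by omega, by omega⟩),
                  if_pos (show start ≤ (j:Int) ∧ PySem.Int.mod ((j:Int) - start) p < sh from ⟨by omega, by omega⟩)]
            · rw [if_neg (show ¬(start + p ≤ (j:Int) ∧ PySem.Int.mod ((j:Int) - start) p < sh) from by rintro ⟨h, -⟩; omega),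
                  if_neg (show ¬(start ≤ (j:Int) ∧ (j:Int) < min (start + sh) n) from by rintro ⟨-, h⟩; omega),
                  if_neg (show ¬(start ≤ (j:Int) ∧ PySem.Int.mod ((j:Int) - start) p < sh) from by rintro ⟨-, h⟩; omega)]
          · -- past the current period
            by_cases hblk : (j : Int) < min (start + sh) n
            · -- j also lies in the current (overlong) block: sh > p, paint twice = paint once
              have hshp : PySem.Int.mod ((j : Int) - start) p < sh := by omega
              rw [if_pos (show start + p ≤ (j:Int) ∧ PySem.Int.mod ((j:Int) - start) p < sh from ⟨by omega, hshp⟩),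
                  if_pos (show start ≤ (j:Int) ∧ (j:Int) < min (start + sh) n from ⟨by omega, hblk⟩),
                  if_pos (show start ≤ (j:Int) ∧ PySem.Int.mod ((j:Int) - start) p < sh from ⟨by omega, hshp⟩)]
              cases m[j]? with
              | none => simp
              | some row => simp [paintRow_idem]
            · rw [if_neg (show ¬(start ≤ (j:Int) ∧ (j:Int) < min (start + sh) n) from by rintro ⟨-, h⟩; omega)]
              by_cases hsh : PySem.Int.mod ((j : Int) - start) p < sh
              · rw [if_pos (show start + p ≤ (j:Int) ∧ PySem.Int.mod ((j:Int) - start) p < sh from ⟨by omega, hsh⟩),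
                    if_pos (show start ≤ (j:Int) ∧ PySem.Int.mod ((j:Int) - start) p < sh from ⟨by omega, hsh⟩)]
              · rw [if_neg (show ¬(start + p ≤ (j:Int) ∧ PySem.Int.mod ((j:Int) - start) p < sh) from by rintro ⟨-, h⟩; omega),
                    if_neg (show ¬(start ≤ (j:Int) ∧ PySem.Int.mod ((j:Int) - start) p < sh) from by rintro ⟨-, h⟩; omega)]
      · rw [show m[j]? = none from List.getElem?_eq_none (by omega)]
        split_ifs <;> simp
    · rw [if_neg hlt]
      by_cases hj : j < m.length
      · rw [if_neg (by omega)]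
      · rw [List.getElem?_eq_none (by omega)]
        split <;> simp

theorem red_stripe_spec : Claim_equal_red_stripe := by
  intro im sh gh _ hpre
  obtain ⟨-, hp, -⟩ := hpre
  unfold Spec_red_stripe red_stripe red_stripe_alt
  simp only []
  set w := ((PySem.List.pyGet? im 0).getD []).length with hw
  set p := sh + gh with hpdef
  have hA := goA_eq_mapIdx sh p w (by omega) im 0
  rw [show PySem.Int.mod (((0:Nat) : Int)) p = (0:Int) from by
        simpa using pymod_of_lt p 0 le_rfl (by omega)] at hA
  rw [hA]
  apply List.ext_getElem?
  intro j
  rw [List.getElem?_mapIdx]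
  have hfuel : (im.length : Int) ≤ 0 + ((im.length + 1 : Nat) : Int) * p := by
    have h1 : ((im.length : Int) + 1) * 1 ≤ ((im.length : Int) + 1) * p :=
      mul_le_mul_of_nonneg_left hp (by positivity)
    push_cast
    omega
  rw [goB_getElem? sh p w (im.length : Int) hp (im.length + 1) 0 im j le_rfl rfl hfuel]
  simp only [Nat.cast_zero, zero_add, sub_zero]
  by_cases hc : PySem.Int.mod ((j : Int)) p < sh
  · rw [if_pos ⟨by omega, hc⟩]
    cases im[j]? <;> simp [hc]
  · rw [if_neg (by rintro ⟨-, h⟩; omega)]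
    cases im[j]? <;> simp [hc]
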